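-- pv_equiv track=rewrite | github.com/ktan9811/GrayScale_ImageProcess | Py_ImgProcess/MyImgProcess.py | setEmbossMask
-- ===== SOURCE A (Python) =====
-- def malloc2D(H, W):
--     memory = [[0 for _ in range(W)]for _ in range(H)]
--     return memory
--
-- def setEmbossMask(k):
--     mask = malloc2D(k, k)
--     for y in range (k):
--         for x in range (k):
--             if (y > x) : mask[y][x] = 1
--             elif (y < x) : mask[y][x] = -1
--             else : mask[y][x] = 0
--
--     return mask
-- ===== SOURCE B (Python) =====
-- def setEmbossMask(k):
--     # Build each row directly as three constant runs: y ones, one zero, k-y-1 minus-ones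
--     # (cell value is sign(y - x)).
--     return [[1] * y + [0] + [-1] * (k - y - 1) for y in range(k)]
-- ===== Notes on version B (the rewrite author's own statement) =====
-- stated objective: simpler
-- what changed: Replaces allocate-then-mutate with nested per-cell three-way branch by direct construction of each row as three constant runs ([1]*y + [0] + [-1]*(k-y-1)), exploiting that the cell value is sign(y-x).
import Mathlib
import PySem

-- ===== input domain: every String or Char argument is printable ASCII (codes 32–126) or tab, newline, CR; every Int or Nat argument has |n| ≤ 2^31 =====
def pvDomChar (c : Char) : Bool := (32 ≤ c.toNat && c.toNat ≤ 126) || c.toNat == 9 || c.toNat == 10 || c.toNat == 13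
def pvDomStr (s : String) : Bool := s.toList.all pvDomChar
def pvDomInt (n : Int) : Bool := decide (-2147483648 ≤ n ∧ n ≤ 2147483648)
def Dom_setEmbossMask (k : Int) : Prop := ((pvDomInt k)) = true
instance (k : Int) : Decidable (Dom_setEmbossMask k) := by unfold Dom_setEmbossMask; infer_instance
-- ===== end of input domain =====

-- B builds each row directly as three constant runs ([1]*y + [0] + [-1]*(k-y-1)) instead of
-- A's allocate-then-mutate nested per-cell branch; objective: simpler.

-- ===== PORT A =====
def malloc2D (H W : Int) : List (List Int) :=
  (PySem.List.pyRange 0 H 1).map (fun _ => (PySem.List.pyRange 0 W 1).map (fun _ => (0 : Int)))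

-- mask[y][x] = v : y, x come from range(k) hence are nonnegative in-range indices,
-- so Python's item assignment is exactly List.set at the toNat indices.
def setEmbossMask (k : Int) : List (List Int) :=
  (PySem.List.pyRange 0 k 1).foldl (fun mask y =>
    (PySem.List.pyRange 0 k 1).foldl (fun mask x =>
      mask.set y.toNat ((mask.getD y.toNat []).set x.toNat
        (if y > x then (1 : Int) else if y < x then (-1 : Int) else 0))) mask)
    (malloc2D k k)

-- ===== PORT B =====
def setEmbossMask_alt (k : Int) : List (List Int) :=
  (PySem.List.pyRange 0 k 1).map (fun y =>
    List.replicate y.toNat (1 : Int) ++ [(0 : Int)] ++ List.replicate (k - y - 1).toNat (-1 : Int))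

-- ===== PRECONDITION & SPEC =====
def Spec_setEmbossMask (k : Int) (out : List (List Int)) : Prop := out = setEmbossMask_alt k
instance (k : Int) (out : List (List Int)) : Decidable (Spec_setEmbossMask k out) := by unfold Spec_setEmbossMask; infer_instance

-- ===== CLAIM (what is proved, stated in full; the proofs are below) =====
def Claim_equal_setEmbossMask : Prop := ∀ (k : Int), Dom_setEmbossMask k → Spec_setEmbossMask k (setEmbossMask k)

-- ===== LEMMAS AND PROOFS =====

theorem pv_set_append_len {α : Type} (a b : List α) (x : α) :
    (a ++ b).set a.length x = a ++ b.set 0 x := by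
  induction a with
  | nil => rfl
  | cons h t ih => simp [ih]

theorem pv_getD_append_len {α : Type} (a b : List α) (d : α) :
    (a ++ b).getD a.length d = b.getD 0 d := by
  induction a with
  | nil => rfl
  | cons h t ih => simpa [List.getD] using ih

theorem pv_set_getD_self (m : List (List Int)) (y : Nat) :
    m.set y (m.getD y []) = m := by
  by_cases hy : y < m.length
  · apply List.ext_getElem
    · simp
    · intro i h1 h2
      by_cases hiy : i = y
      · subst hiy
        simp [List.getD_eq_getElem?_getD, List.getElem?_eq_getElem hy]
      · simp only [List.getElem_set]
        rw [if_neg (fun h => hiy h.symm)]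
  · rw [List.set_eq_of_length_le (by omega)]

theorem pv_getD_set_self (m : List (List Int)) (y : Nat) (r : List Int) (hy : y < m.length) :
    (m.set y r).getD y [] = r := by
  simp [List.getD_eq_getElem?_getD, hy]

theorem pv_inner_collapse (y : Nat) (g : Nat → Int) (idxs : List Nat) (m : List (List Int)) :
    idxs.foldl (fun m x => m.set y ((m.getD y []).set x (g x))) m
      = m.set y (idxs.foldl (fun r x => r.set x (g x)) (m.getD y [])) := by
  induction idxs generalizing m with
  | nil => simp only [List.foldl_nil]; exact (pv_set_getD_self m y).symm
  | cons x xs ih =>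
    simp only [List.foldl_cons]
    rw [ih]
    by_cases hy : y < m.length
    · rw [pv_getD_set_self _ _ _ hy, List.set_set]
    · have h0 : m.getD y [] = [] := by
        simp [List.getD_eq_getElem?_getD, List.getElem?_eq_none (by omega : m.length ≤ y)]
      have hset : m.set y ([] : List Int) = m := List.set_eq_of_length_le (by omega)
      simp only [h0, List.set_nil, hset]

theorem pv_fill_sets {α : Type} (g : Nat → α) :
    ∀ (n : Nat) (r : List α), n ≤ r.length →
      (List.range n).foldl (fun acc j => acc.set j (g j)) r
        = (List.range n).map g ++ r.drop n := by
  intro n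
  induction n with
  | zero => simp
  | succ n ih =>
    intro r h
    rw [List.range_succ, List.foldl_append, ih r (by omega)]
    simp only [List.foldl_cons, List.foldl_nil]
    have hlen : ((List.range n).map g).length = n := by simp
    have hdrop : r.drop n = r[n]'(by omega) :: r.drop (n + 1) :=
      List.drop_eq_getElem_cons (by omega)
    rw [hdrop]
    have hset := pv_set_append_len ((List.range n).map g) (r[n]'(by omega) :: r.drop (n + 1)) (g n)
    rw [hlen] at hset
    rw [hset, List.map_append]
    simp only [List.set_cons_zero, List.map_cons, List.map_nil, List.append_assoc, List.cons_append, List.nil_append]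

theorem pv_outer_fill (v : Nat → Nat → Int) (n : Nat) :
    ∀ (ys : Nat) (m : List (List Int)), (∀ r ∈ m, r.length = n) → ys ≤ m.length →
      (List.range ys).foldl
          (fun acc y => acc.set y
            ((List.range n).foldl (fun r j => r.set j (v y j)) (acc.getD y []))) m
        = (List.range ys).map (fun y => (List.range n).map (v y)) ++ m.drop ys := by
  intro ys
  induction ys with
  | zero => intro m _ _; simp
  | succ ys ih =>
    intro m hm h
    rw [List.range_succ, List.foldl_append, ih m hm (by omega)]
    simp only [List.foldl_cons, List.foldl_nil]
    have hlen : ((List.range ys).map (fun y => (List.range n).map (v y))).length = ys := by simp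
    have hdrop : m.drop ys = m[ys]'(by omega) :: m.drop (ys + 1) :=
      List.drop_eq_getElem_cons (by omega)
    have hget := pv_getD_append_len ((List.range ys).map (fun y => (List.range n).map (v y)))
      (m.drop ys) []
    rw [hlen] at hget
    rw [hget, hdrop]
    have hrow : (m[ys]'(by omega) : List Int).length = n := hm _ (List.getElem_mem _)
    rw [show ((m[ys]'(by omega) :: m.drop (ys + 1)).getD 0 []) = m[ys]'(by omega) from rfl]
    rw [pv_fill_sets (v ys) n _ hrow.ge]
    rw [show List.drop n (m[ys]'(by omega)) = [] from List.drop_eq_nil_of_le hrow.le,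
      List.append_nil]
    have hset := pv_set_append_len ((List.range ys).map (fun y => (List.range n).map (v y)))
      (m[ys]'(by omega) :: m.drop (ys + 1)) ((List.range n).map (v ys))
    rw [hlen] at hset
    rw [hset, List.map_append]
    simp only [List.set_cons_zero, List.map_cons, List.map_nil, List.append_assoc, List.cons_append, List.nil_append]

theorem pv_row_eq (n y : Nat) (hy : y < n) :
    (List.range n).map (fun (j : Nat) =>
        if ((y : Int) > (j : Int)) then (1 : Int)
        else if ((y : Int) < (j : Int)) then (-1 : Int) else 0)
      = List.replicate y (1 : Int) ++ [(0 : Int)] ++ List.replicate (n - y - 1) (-1 : Int) := by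
  apply List.ext_getElem
  · simp only [List.length_map, List.length_range, List.length_append,
      List.length_replicate, List.length_cons, List.length_nil]
    omega
  · intro i h1 h2
    have hi : i < n := by simpa using h1
    simp only [List.getElem_map, List.getElem_range]
    rcases lt_trichotomy i y with h | h | h
    · rw [if_pos (by exact_mod_cast h),
        List.getElem_append_left (by
          simp only [List.length_append, List.length_replicate, List.length_cons,
            List.length_nil]
          omega),
        List.getElem_append_left (by simpa using h), List.getElem_replicate]
    · subst h
      rw [if_neg (by omega), if_neg (by omega),
        List.getElem_append_left (by
          simp only [List.length_append, List.length_replicate, List.length_cons,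
            List.length_nil]
          omega),
        List.getElem_append_right (by simp)]
      simp
    · rw [if_neg (by omega), if_pos (by exact_mod_cast h),
        List.getElem_append_right (by
          simp only [List.length_append, List.length_replicate, List.length_cons,
            List.length_nil]
          omega),
        List.getElem_replicate]

theorem pv_main (k : Int) : setEmbossMask k = setEmbossMask_alt k := by
  by_cases hk : k ≤ 0
  · simp [setEmbossMask, setEmbossMask_alt, malloc2D, PySem.List.pyRange_one_eq_nil hk]
  · have hkn : ((k.toNat : Int)) = k := Int.toNat_of_nonneg (by omega)
    set n := k.toNat with hn
    unfold setEmbossMask setEmbossMask_alt malloc2D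
    rw [PySem.List.pyRange_one 0 k]
    have hsub : (k - 0).toNat = n := by omega
    rw [hsub]
    simp only [zero_add, List.foldl_map, List.map_map, Function.comp_def, Int.toNat_natCast]
    have hfun : (fun (mask : List (List Int)) (j : Nat) =>
        (List.range n).foldl (fun (mask : List (List Int)) (x : Nat) =>
          mask.set j ((mask.getD j []).set x
            (if ((j : Int) > (x : Int)) then (1 : Int)
             else if ((j : Int) < (x : Int)) then (-1 : Int) else 0))) mask)
        = (fun (acc : List (List Int)) (j : Nat) =>
            acc.set j ((List.range n).foldl (fun (r : List Int) (x : Nat) =>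
              r.set x (if ((j : Int) > (x : Int)) then (1 : Int)
                else if ((j : Int) < (x : Int)) then (-1 : Int) else 0)) (acc.getD j []))) := by
      funext acc j
      exact pv_inner_collapse j _ (List.range n) acc
    rw [hfun]
    rw [pv_outer_fill (fun (y x : Nat) =>
        if ((y : Int) > (x : Int)) then (1 : Int)
        else if ((y : Int) < (x : Int)) then (-1 : Int) else 0) n n
        ((List.range n).map (fun _ => (List.range n).map (fun _ => (0 : Int))))
        (by intro r hr
            rw [List.mem_map] at hr
            obtain ⟨a, _, rfl⟩ := hr
            simp)
        (by simp)]
    rw [List.drop_eq_nil_of_le (by simp), List.append_nil]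
    apply List.map_congr_left
    intro j hj
    rw [List.mem_range] at hj
    rw [pv_row_eq n j hj]
    have h2 : (k - (j : Int) - 1).toNat = n - j - 1 := by omega
    rw [h2]

-- ===== VERDICT (by name: the statement is the Claim_ definition above) =====
theorem setEmbossMask_spec : Claim_equal_setEmbossMask := by
  intro k _
  unfold Spec_setEmbossMask
  exact pv_main k
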